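-- pv_equiv track=rewrite | github.com/kaospower/algorithm_competition_template | 算法/图论算法/图论算法在网格图上应用/网格图找环/dfs/FindCycle.py | containsCycle
-- ===== SOURCE A (Python) =====
-- from typing import List
--
-- def containsCycle(grid: List[List[str]]) -> bool:
--     n,m=len(grid),len(grid[0])
--     def f(x,y,px,py):
--         vis.add((x,y))
--         for dx,dy in [(0,1),(0,-1),(-1,0),(1,0)]:
--             nx,ny=x+dx,y+dy
--             if 0<=nx<n and 0<=ny<m and grid[nx][ny]==grid[x][y] and not (nx==px and ny==py) and ((nx,ny) in vis or f(nx,ny,x,y)):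
--                 return True
--         return False
--     vis=set()
--     for i,row in enumerate(grid):
--         for j,v in enumerate(row):
--             if (i,j) not in vis and f(i,j,-1,-1):
--                 return True
--     return False
-- ===== SOURCE B (Python) =====
-- from typing import List
--
-- def containsCycle(grid: List[List[str]]) -> bool:
--     # Worklist DFS: cells listed up front; an explicit stack of candidate edges
--     # (neighbour, parent), generated eagerly when a cell is first visited, with
--     # the visited-test deferred to pop time.
--     n, m = len(grid), len(grid[0])
--     cells = [(i, j) for i, row in enumerate(grid) for j in range(len(row))]
--     vis = set()
--     for c in cells:
--         if c in vis:
--             continue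
--         stack = [(c[0], c[1], -1, -1)]
--         while stack:
--             x, y, px, py = stack.pop()
--             if (x, y) in vis:
--                 return True
--             vis.add((x, y))
--             cand = [(x + dx, y + dy, x, y)
--                     for dx, dy in ((0, 1), (0, -1), (-1, 0), (1, 0))
--                     if 0 <= x + dx < n and 0 <= y + dy < m
--                     and not (x + dx == px and y + dy == py)
--                     and grid[x + dx][y + dy] == grid[x][y]]
--             stack.extend(reversed(cand))
--     return False
-- ===== Notes on version B (the rewrite author's own statement) =====
-- stated objective: alternative
-- what changed: A's recursive DFS with a per-direction resume is replaced by a two-stage worklist: the cell list is precomputed, and each visited cell eagerly generates its candidate edges (neighbour, parent) onto an explicit stack, with the visited-test deferred to pop time.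
-- outside the precondition, e.g. on containsCycle([['a', 'a'], ['a', 'a'], ['a']]): A returns True, B raises IndexError
import Mathlib
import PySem

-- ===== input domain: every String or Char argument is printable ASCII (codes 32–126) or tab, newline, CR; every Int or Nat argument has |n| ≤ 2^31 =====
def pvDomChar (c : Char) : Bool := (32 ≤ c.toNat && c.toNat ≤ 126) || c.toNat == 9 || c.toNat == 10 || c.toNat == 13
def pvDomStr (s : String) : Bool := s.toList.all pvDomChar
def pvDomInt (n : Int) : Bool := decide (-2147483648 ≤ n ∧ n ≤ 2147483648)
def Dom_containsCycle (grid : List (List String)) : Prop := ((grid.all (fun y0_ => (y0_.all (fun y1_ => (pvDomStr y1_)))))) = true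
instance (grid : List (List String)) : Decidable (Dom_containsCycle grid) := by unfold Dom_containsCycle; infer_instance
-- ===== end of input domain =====

-- B replaces A's recursive per-direction DFS by a two-stage worklist: the cell list is built
-- up front, and each visited cell eagerly pushes its candidate edges onto an explicit stack,
-- the visited-test being deferred to pop time; equal cost, objective: alternative.

-- ===== PORT A =====
-- A-side helpers: the direction list, cell access, the finite cell universe and the count of
-- not-yet-visited cells, which is the termination measure of the DFS.
def pvDirs : List (Int × Int) := [(0,1),(0,-1),(-1,0),(1,0)]

def pvCell (grid : List (List String)) (x y : Int) : Option String :=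
  (PySem.List.pyGet? grid x).bind (fun r => PySem.List.pyGet? r y)

def pvMaxLen (grid : List (List String)) : Nat :=
  grid.foldr (fun r a => max r.length a) 0

def pvUniv (grid : List (List String)) : List (Int × Int) :=
  (List.range grid.length).flatMap (fun i => (List.range (pvMaxLen grid)).map (fun j => ((i:Int),(j:Int))))

def pvUnseen (grid : List (List String)) (vis : PySem.Set (Int × Int)) : Nat :=
  ((pvUniv grid).filter (fun c => !(PySem.Set.contains vis c))).length

theorem pvNotContains (vis : PySem.Set (Int × Int)) (a : Int × Int) :
    (PySem.Set.contains vis a = false) ↔ a ∉ vis := by simp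

theorem pvMem_pvUniv (grid : List (List String)) (a b : Int) :
    (a,b) ∈ pvUniv grid ↔ (0 ≤ a ∧ a < (grid.length : Int) ∧ 0 ≤ b ∧ b < (pvMaxLen grid : Int)) := by
  simp [pvUniv]
  constructor
  · rintro ⟨i, hi, j, hj, rfl, rfl⟩
    omega
  · rintro ⟨h1, h2, h3, h4⟩
    exact ⟨⟨a.toNat, by omega, by omega⟩, ⟨b.toNat, by omega, by omega⟩⟩

theorem pvHead_le_maxLen (grid : List (List String)) : grid.headI.length ≤ pvMaxLen grid := by
  cases grid with
  | nil => rfl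
  | cons r rest => simp [pvMaxLen]

theorem pvUnseen_add_lt (grid : List (List String)) (vis : PySem.Set (Int × Int))
    (c : Int × Int) (hU : c ∈ pvUniv grid) (hc : c ∉ vis) :
    pvUnseen grid (PySem.Set.add vis c) < pvUnseen grid vis := by
  unfold pvUnseen
  have hsub : ((pvUniv grid).filter (fun u => !(PySem.Set.contains (PySem.Set.add vis c) u))).Sublist
      ((pvUniv grid).filter (fun u => !(PySem.Set.contains vis u))) := by
    apply List.monotone_filter_right
    intro a ha
    simp only [Bool.not_eq_eq_eq_not, Bool.not_true, pvNotContains] at *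
    exact fun h => ha ((PySem.Set.mem_add _ _ _).mpr (Or.inl h))
  apply hsub.length_le.lt_of_ne
  intro heq
  have heqL := hsub.eq_of_length heq
  have hcin : c ∈ (pvUniv grid).filter (fun u => !(PySem.Set.contains vis u)) := by
    simp only [List.mem_filter, Bool.not_eq_eq_eq_not, Bool.not_true, pvNotContains]
    exact ⟨hU, hc⟩
  rw [← heqL] at hcin
  have h2 := (List.mem_filter.mp hcin).2
  simp only [Bool.not_eq_eq_eq_not, Bool.not_true, pvNotContains] at h2
  exact h2 ((PySem.Set.mem_add _ _ _).mpr (Or.inr rfl))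

theorem pvUnseen_le_of_subset (grid : List (List String)) (vis v : PySem.Set (Int × Int))
    (h : vis ⊆ v) : pvUnseen grid v ≤ pvUnseen grid vis := by
  apply List.Sublist.length_le
  apply List.monotone_filter_right
  intro a
  simp only [Bool.not_eq_eq_eq_not, Bool.not_true, pvNotContains]
  exact fun hv hva => hv (h hva)

def fA (grid : List (List String)) (ds : List (Int × Int)) (x y px py : Int)
    (vis : PySem.Set (Int × Int)) : {p : Bool × PySem.Set (Int × Int) // vis ⊆ p.2} :=
  match ds with
  | [] => ⟨(false, vis), fun _ h => h⟩
  | (dx, dy) :: rest =>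
    let n : Int := grid.length
    let m : Int := grid.headI.length
    let nx := x + dx
    let ny := y + dy
    if h : 0 ≤ nx ∧ nx < n ∧ 0 ≤ ny ∧ ny < m ∧
        pvCell grid nx ny = pvCell grid x y ∧ ¬(nx = px ∧ ny = py) then
      if hv : (nx, ny) ∈ vis then ⟨(true, vis), fun _ h => h⟩
      else
        match fA grid pvDirs nx ny x y (PySem.Set.add vis (nx, ny)) with
        | ⟨(true, v), hp⟩ =>
          ⟨(true, v), fun a ha => hp ((PySem.Set.mem_add _ _ _).mpr (Or.inl ha))⟩
        | ⟨(false, v), hp⟩ =>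
          let r2 := fA grid rest x y px py v
          ⟨r2.val, fun a ha => r2.property (hp ((PySem.Set.mem_add _ _ _).mpr (Or.inl ha)))⟩
    else fA grid rest x y px py vis
termination_by (pvUnseen grid vis, ds.length)
decreasing_by
  · left
    apply pvUnseen_add_lt
    · rw [pvMem_pvUniv]
      refine ⟨h.1, h.2.1, h.2.2.1, ?_⟩
      have := pvHead_le_maxLen grid
      omega
    · exact hv
  · have h1 : pvUnseen grid v ≤ pvUnseen grid (PySem.Set.add vis (nx, ny)) :=
      pvUnseen_le_of_subset _ _ _ hp
    have h2 : pvUnseen grid (PySem.Set.add vis (nx, ny)) < pvUnseen grid vis := by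
      apply pvUnseen_add_lt
      · rw [pvMem_pvUniv]
        refine ⟨h.1, h.2.1, h.2.2.1, ?_⟩
        have := pvHead_le_maxLen grid
        omega
      · exact hv
    left; omega
  · rcases Nat.lt_or_ge (pvUnseen grid vis) (pvUnseen grid vis) with h' | _
    · omega
    · right; simp

def fStartA (grid : List (List String)) (x y px py : Int) (vis : PySem.Set (Int × Int)) :
    Bool × PySem.Set (Int × Int) :=
  (fA grid pvDirs x y px py (PySem.Set.add vis (x, y))).val

def aCols (grid : List (List String)) (i : Int) (row : List String) (j : Int)
    (vis : PySem.Set (Int × Int)) : Bool × PySem.Set (Int × Int) :=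
  match row with
  | [] => (false, vis)
  | _ :: rest =>
    if (i, j) ∈ vis then aCols grid i rest (j + 1) vis
    else
      match fStartA grid i j (-1) (-1) vis with
      | (true, v) => (true, v)
      | (false, v) => aCols grid i rest (j + 1) v

def aRows (grid : List (List String)) (rows : List (List String)) (i : Int)
    (vis : PySem.Set (Int × Int)) : Bool :=
  match rows with
  | [] => false
  | row :: rest =>
    match aCols grid i row 0 vis with
    | (true, _) => true
    | (false, v) => aRows grid rest (i + 1) v

def containsCycle (grid : List (List String)) : Bool :=
  match grid with
  | [] => false
  | _ :: _ => aRows grid grid 0 PySem.Set.empty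

-- ===== PORT B =====
def bDirs : List (Int × Int) := [(0,1),(0,-1),(-1,0),(1,0)]

def bAt (g : List (List String)) (i j : Int) : Option String := do
  let r ← PySem.List.pyGet? g i
  PySem.List.pyGet? r j

-- the candidate-edge comprehension: every in-bounds, same-valued, non-parent neighbour
def bCand (g : List (List String)) (x y px py : Int) : List (Int × Int × Int × Int) :=
  bDirs.filterMap (fun d =>
    if (decide (0 ≤ x + d.1) && decide (x + d.1 < (g.length : Int))
        && decide (0 ≤ y + d.2) && decide (y + d.2 < (g.headI.length : Int))
        && !((x + d.1 == px) && (y + d.2 == py))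
        && (bAt g (x + d.1) (y + d.2) == bAt g x y))
    then some (x + d.1, y + d.2, x, y) else none)

theorem bCand_len (g : List (List String)) (x y px py : Int) :
    (bCand g x y px py).length ≤ 4 := by
  have h := List.length_filterMap_le (l := bDirs) (f := fun d =>
    if (decide (0 ≤ x + d.1) && decide (x + d.1 < (g.length : Int))
        && decide (0 ≤ y + d.2) && decide (y + d.2 < (g.headI.length : Int))
        && !((x + d.1 == px) && (y + d.2 == py))
        && (bAt g (x + d.1) (y + d.2) == bAt g x y))
    then some (x + d.1, y + d.2, x, y) else none)
  simpa [bCand, bDirs] using h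

-- the while loop over the edge stack (head of the list = top of the stack)
def bRun (g : List (List String)) (vis : PySem.Set (Int × Int))
    (stack : List (Int × Int × Int × Int)) : Bool × PySem.Set (Int × Int) :=
  match stack with
  | [] => (false, vis)
  | (x, y, px, py) :: rest =>
    -- totality guard: every pushed frame is in bounds, so the else branch is unreachable
    if hb : 0 ≤ x ∧ x < (g.length : Int) ∧ 0 ≤ y ∧ y < (pvMaxLen g : Int) then
      if (x, y) ∈ vis then (true, vis)
      else bRun g (PySem.Set.add vis (x, y)) (bCand g x y px py ++ rest)
    else bRun g vis rest
termination_by 5 * pvUnseen g vis + stack.length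
decreasing_by
  · have hlen := bCand_len g x y px py
    have hu : pvUnseen g (PySem.Set.add vis (x, y)) < pvUnseen g vis := by
      apply pvUnseen_add_lt
      · rw [pvMem_pvUniv]; exact hb
      · assumption
    simp only [List.length_append, List.length_cons]
    omega
  · simp only [List.length_cons]; omega

def bCells (g : List (List String)) : List (Int × Int) :=
  (PySem.List.enumerate g).flatMap
    (fun p => (List.range p.2.length).map (fun (j : Nat) => (p.1, (j : Int))))

def bScan (g : List (List String)) (cells : List (Int × Int))
    (vis : PySem.Set (Int × Int)) : Bool :=
  match cells with
  | [] => false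
  | c :: cs =>
    if c ∈ vis then bScan g cs vis
    else
      let r := bRun g vis [(c.1, c.2, -1, -1)]
      if r.1 then true else bScan g cs r.2

def containsCycle_alt (grid : List (List String)) : Bool :=
  bScan grid (bCells grid) PySem.Set.empty

-- ===== PRECONDITION & SPEC =====
-- Pre_ excludes the empty grid (Python raises IndexError at len(grid[0])) and grids having a
-- row shorter than row 0, on which the neighbour probes of both programs can raise IndexError
-- at grid[nx][ny]; on some such ragged grids A still returns True (a cycle is found before any
-- short row is probed) while B raises — see the cite in claim.json.
def Pre_containsCycle (grid : List (List String)) : Prop :=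
  grid ≠ [] ∧ ∀ row ∈ grid, grid.headI.length ≤ row.length
instance (grid : List (List String)) : Decidable (Pre_containsCycle grid) := by
  unfold Pre_containsCycle; infer_instance

def pvWitness_containsCycle : List (List String) := [["a", "a"], ["a", "a"]]

def Spec_containsCycle (grid : List (List String)) (out : Bool) : Prop := out = containsCycle_alt grid
instance (grid : List (List String)) (out : Bool) : Decidable (Spec_containsCycle grid out) := by
  unfold Spec_containsCycle; infer_instance

-- ===== CLAIM (what is proved, stated in full; the proofs are below) =====
def Claim_equal_containsCycle : Prop := ∀ (grid : List (List String)), Dom_containsCycle grid → Pre_containsCycle grid → Spec_containsCycle grid (containsCycle grid)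

-- ===== LEMMAS AND PROOFS =====
-- bCand generalized to an arbitrary direction suffix (proof-side only)
def bFrom (g : List (List String)) (ds : List (Int × Int)) (x y px py : Int) :
    List (Int × Int × Int × Int) :=
  ds.filterMap (fun d =>
    if (decide (0 ≤ x + d.1) && decide (x + d.1 < (g.length : Int))
        && decide (0 ≤ y + d.2) && decide (y + d.2 < (g.headI.length : Int))
        && !((x + d.1 == px) && (y + d.2 == py))
        && (bAt g (x + d.1) (y + d.2) == bAt g x y))
    then some (x + d.1, y + d.2, x, y) else none)

theorem bCand_eq_bFrom (g : List (List String)) (x y px py : Int) :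
    bCand g x y px py = bFrom g pvDirs x y px py := rfl

theorem bcond_iff (g : List (List String)) (x y px py dx dy : Int) :
    ((decide (0 ≤ x + dx) && decide (x + dx < (g.length : Int))
      && decide (0 ≤ y + dy) && decide (y + dy < (g.headI.length : Int))
      && !((x + dx == px) && (y + dy == py))
      && (bAt g (x + dx) (y + dy) == bAt g x y)) = true)
    ↔ (0 ≤ x + dx ∧ x + dx < (g.length : Int) ∧ 0 ≤ y + dy ∧ y + dy < (g.headI.length : Int) ∧
        pvCell g (x + dx) (y + dy) = pvCell g x y ∧ ¬(x + dx = px ∧ y + dy = py)) := by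
  simp [bAt, pvCell]
  tauto

theorem bFrom_cons (g : List (List String)) (dx dy : Int) (ds' : List (Int × Int))
    (x y px py : Int) :
    bFrom g ((dx, dy) :: ds') x y px py =
      (if (decide (0 ≤ x + dx) && decide (x + dx < (g.length : Int))
          && decide (0 ≤ y + dy) && decide (y + dy < (g.headI.length : Int))
          && !((x + dx == px) && (y + dy == py))
          && (bAt g (x + dx) (y + dy) == bAt g x y))
       then [(x + dx, y + dy, x, y)] else []) ++ bFrom g ds' x y px py := by
  cases h : (decide (0 ≤ x + dx) && decide (x + dx < (g.length : Int))
      && decide (0 ≤ y + dy) && decide (y + dy < (g.headI.length : Int))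
      && !((x + dx == px) && (y + dy == py))
      && (bAt g (x + dx) (y + dy) == bAt g x y)) <;>
    · rw [bFrom, List.filterMap_cons, h]
      rfl

theorem bRun_nil (g : List (List String)) (vis : PySem.Set (Int × Int)) :
    bRun g vis [] = (false, vis) := by rw [bRun]

theorem bSim (g : List (List String)) :
    ∀ (N : Nat) (ds : List (Int × Int)) (x y px py : Int) (vis : PySem.Set (Int × Int))
      (rest : List (Int × Int × Int × Int)),
      5 * pvUnseen g vis + ds.length ≤ N →
      bRun g vis (bFrom g ds x y px py ++ rest) =
        (if (fA g ds x y px py vis).val.1 = true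
         then (true, (fA g ds x y px py vis).val.2)
         else bRun g (fA g ds x y px py vis).val.2 rest) := by
  intro N
  induction N with
  | zero =>
    intro ds x y px py vis rest hb
    have : ds = [] := List.length_eq_zero_iff.mp (by omega)
    subst this
    rw [bFrom, fA]
    simp
  | succ N IH =>
    intro ds x y px py vis rest hb
    match ds with
    | [] =>
      rw [bFrom, fA]
      simp
    | (dx, dy) :: ds' =>
      rw [bFrom_cons]
      conv_rhs => rw [fA]
      simp only [pvCell]
      by_cases hc : 0 ≤ x + dx ∧ x + dx < (g.length : Int) ∧ 0 ≤ y + dy ∧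
          y + dy < (g.headI.length : Int) ∧
          (((PySem.List.pyGet? g (x + dx)).bind fun r => PySem.List.pyGet? r (y + dy)) =
            (PySem.List.pyGet? g x).bind fun r => PySem.List.pyGet? r y) ∧
          ¬(x + dx = px ∧ y + dy = py)
      · have hbool := (bcond_iff g x y px py dx dy).mpr (by exact hc)
        rw [hbool]
        simp only [if_true, List.singleton_append]
        simp only [dif_pos hc]
        have hguard : 0 ≤ x + dx ∧ x + dx < (g.length : Int) ∧ 0 ≤ y + dy ∧
            y + dy < (pvMaxLen g : Int) := by
          have := pvHead_le_maxLen g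
          exact ⟨hc.1, hc.2.1, hc.2.2.1, by omega⟩
        conv_lhs => rw [List.cons_append, bRun]
        rw [dif_pos hguard]
        by_cases hm : (x + dx, y + dy) ∈ vis
        · simp only [if_pos hm, dif_pos hm]
          simp
        · simp only [if_neg hm, dif_neg hm]
          have hmu : pvUnseen g (PySem.Set.add vis (x + dx, y + dy)) < pvUnseen g vis := by
            apply pvUnseen_add_lt
            · rw [pvMem_pvUniv]; exact hguard
            · exact hm
          rw [bCand_eq_bFrom]
          have hIH1 := IH pvDirs (x + dx) (y + dy) x y (PySem.Set.add vis (x + dx, y + dy))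
            (bFrom g ds' x y px py ++ rest) (by simp only [List.length_cons] at hb; simp [pvDirs]; omega)
          rw [hIH1]
          rcases hr : fA g pvDirs (x + dx) (y + dy) x y (PySem.Set.add vis (x + dx, y + dy))
            with ⟨⟨b, v⟩, hp⟩
          cases b
          · have hIH2 := IH ds' x y px py v rest (by
              have h1 : pvUnseen g v ≤ pvUnseen g (PySem.Set.add vis (x + dx, y + dy)) :=
                pvUnseen_le_of_subset _ _ _ hp
              have h2 : pvUnseen g (PySem.Set.add vis (x + dx, y + dy)) < pvUnseen g vis := hmu
              simp only [List.length_cons] at hb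
              omega)
            simp only [Bool.false_eq_true, if_false]
            exact hIH2
          · simp
      · have hbool : ((decide (0 ≤ x + dx) && decide (x + dx < (g.length : Int))
            && decide (0 ≤ y + dy) && decide (y + dy < (g.headI.length : Int))
            && !((x + dx == px) && (y + dy == py))
            && (bAt g (x + dx) (y + dy) == bAt g x y)) = false) :=
          Bool.eq_false_iff.mpr (fun hh =>
            hc (by simpa [pvCell] using (bcond_iff g x y px py dx dy).mp hh))
        rw [hbool]
        simp only [Bool.false_eq_true, if_false, List.nil_append]
        simp only [dif_neg hc]
        have hIH2 := IH ds' x y px py vis rest (by simp only [List.length_cons] at hb; omega)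
        exact hIH2

-- the flat cell list, structured (proof-side)
def cellsRow (i j : Int) (row : List String) : List (Int × Int) :=
  match row with
  | [] => []
  | _ :: t => (i, j) :: cellsRow i (j + 1) t

def cellsRows (i : Int) (rows : List (List String)) : List (Int × Int) :=
  match rows with
  | [] => []
  | r :: t => cellsRow i 0 r ++ cellsRows (i + 1) t

theorem cellsRow_eq_range (row : List String) :
    ∀ (i j : Int), (List.range row.length).map (fun (k : Nat) => (i, j + (k : Int))) = cellsRow i j row := by
  induction row with
  | nil => intro i j; simp [cellsRow]
  | cons hd t IH =>
    intro i j
    rw [cellsRow, List.length_cons, List.range_succ_eq_map, List.map_cons, List.map_map]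
    simp only [Nat.cast_zero, add_zero]
    congr 1
    rw [← IH i (j + 1)]
    apply List.map_congr_left
    intro k _
    simp only [Function.comp_apply]
    congr 1
    push_cast
    ring

theorem bCells_aux (rows : List (List String)) :
    ∀ (s : Int),
      (PySem.List.enumerate rows s).flatMap
        (fun p => (List.range p.2.length).map (fun (j : Nat) => (p.1, (j : Int)))) = cellsRows s rows := by
  induction rows with
  | nil => intro s; simp [PySem.List.enumerate_nil, cellsRows]
  | cons r t IH =>
    intro s
    rw [PySem.List.enumerate_cons, List.flatMap_cons, cellsRows, IH (s + 1)]
    congr 1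
    rw [← cellsRow_eq_range r s 0]
    apply List.map_congr_left
    intro k _
    simp

theorem bCells_eq (g : List (List String)) : bCells g = cellsRows 0 g := by
  rw [bCells, bCells_aux g 0]

theorem colsSim (g : List (List String)) (row : List String) :
    ∀ (j i : Int) (vis : PySem.Set (Int × Int)) (cs : List (Int × Int)),
      0 ≤ i → i < (g.length : Int) → 0 ≤ j → j + (row.length : Int) ≤ (pvMaxLen g : Int) →
      bScan g (cellsRow i j row ++ cs) vis =
        (match aCols g i row j vis with
         | (true, _) => true
         | (false, v) => bScan g cs v) := by
  induction row with
  | nil => intro j i vis cs _ _ _ _; rw [cellsRow, aCols]; simp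
  | cons hd t IH =>
    intro j i vis cs hi0 hi1 hj0 hj1
    rw [cellsRow, aCols, List.cons_append, bScan]
    by_cases hm : (i, j) ∈ vis
    · simp only [if_pos hm]
      exact IH (j + 1) i vis cs hi0 hi1 (by omega)
        (by simp only [List.length_cons] at hj1; push_cast at hj1 ⊢; omega)
    · simp only [if_neg hm]
      have hj2 : j < (pvMaxLen g : Int) := by
        simp only [List.length_cons] at hj1; push_cast at hj1; omega
      conv_lhs =>
        rw [show bRun g vis [(i, j, -1, -1)] = bRun g vis (bFrom g [] i j (-1) (-1) ++ [(i, j, -1, -1)]) from by rw [bFrom]; simp]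
      rw [bSim g (5 * pvUnseen g vis) [] i j (-1) (-1) vis [(i, j, -1, -1)] (by simp)]
      rw [fA]
      simp only [Bool.false_eq_true, if_false]
      rw [bRun, dif_pos ⟨hi0, hi1, hj0, hj2⟩, if_neg hm, bCand_eq_bFrom, List.append_nil]
      have hs := bSim g (5 * pvUnseen g (PySem.Set.add vis (i, j)) + 4) pvDirs i j (-1) (-1)
        (PySem.Set.add vis (i, j)) [] (by simp [pvDirs])
      rw [List.append_nil] at hs
      rw [hs]
      rw [show fStartA g i j (-1) (-1) vis = (fA g pvDirs i j (-1) (-1) (PySem.Set.add vis (i, j))).val from rfl]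
      rcases hr : fA g pvDirs i j (-1) (-1) (PySem.Set.add vis (i, j)) with ⟨⟨b, v⟩, hp⟩
      cases b
      · simp only [Bool.false_eq_true, if_false]
        rw [bRun_nil]
        exact IH (j + 1) i v cs hi0 hi1 (by omega)
          (by simp only [List.length_cons] at hj1; push_cast at hj1 ⊢; omega)
      · simp
  
theorem pvRow_le_maxLen (g : List (List String)) (r : List String) (h : r ∈ g) :
    r.length ≤ pvMaxLen g := by
  induction g with
  | nil => simp at h
  | cons a t IH =>
    rcases List.mem_cons.mp h with rfl | h'
    · simp [pvMaxLen]
    · have := IH h'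
      simp only [pvMaxLen, List.foldr_cons] at *
      omega

theorem rowsSim (g : List (List String)) (rows : List (List String)) :
    ∀ (i : Int) (vis : PySem.Set (Int × Int)),
      0 ≤ i → i + (rows.length : Int) ≤ (g.length : Int) →
      (∀ r ∈ rows, r.length ≤ pvMaxLen g) →
      bScan g (cellsRows i rows) vis = aRows g rows i vis := by
  induction rows with
  | nil => intro i vis _ _ _; rw [cellsRows, aRows, bScan]
  | cons r t IH =>
    intro i vis hi0 hi1 hrows
    rw [cellsRows, aRows]
    rw [colsSim g r 0 i vis (cellsRows (i + 1) t) hi0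
      (by simp only [List.length_cons] at hi1; push_cast at hi1; omega) le_rfl
      (by have := hrows r (List.mem_cons_self); omega)]
    rcases hr : aCols g i r 0 vis with ⟨b, v⟩
    cases b
    · simp only []
      exact IH (i + 1) v (by omega)
        (by simp only [List.length_cons] at hi1; push_cast at hi1 ⊢; omega)
        (fun r' hr' => hrows r' (List.mem_cons_of_mem _ hr'))
    · simp

theorem pvTopEq (grid : List (List String)) : containsCycle grid = containsCycle_alt grid := by
  cases grid with
  | nil => rfl
  | cons r rest =>
    rw [containsCycle, containsCycle_alt, bCells_eq]
    rw [rowsSim (r :: rest) (r :: rest) 0 PySem.Set.empty le_rfl (by simp)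
      (fun r' hr' => pvRow_le_maxLen _ r' hr')]

-- ===== VERDICT (by name: the statement is the Claim_ definition above) =====
theorem containsCycle_spec : Claim_equal_containsCycle := by
  intro grid _ _
  unfold Spec_containsCycle
  exact pvTopEq grid
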